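-- pv_equiv track=rewrite | github.com/iqbal-lab-org/gramtools | gramtools/infer.py | _parse_prg_chars
-- ===== SOURCE A (Python) =====
-- DIGITS = {
--     '0', '1', '2', '3',
--     '4', '5', '6', '7',
--     '8', '9'
-- }
--
-- def _is_int(data):
--     if data is None or data == '':
--         return False
--     if len(data) > 1:
--         return True
--     return data in DIGITS
--
-- def _parse_prg_chars(chars):
--     int_chars = []
--     for char in chars:
--         if _is_int(char):
--             int_chars.append(char)
--             continue
--
--         else:
--             if int_chars:
--                 yield ''.join(int_chars)
--                 int_chars = []
--             yield char
--
--     if int_chars: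
--         yield ''.join(int_chars)
-- ===== SOURCE B (Python) =====
-- DIGITS = {
--     '0', '1', '2', '3',
--     '4', '5', '6', '7',
--     '8', '9'
-- }
--
-- def _is_int(data):
--     if data is None or data == '':
--         return False
--     if len(data) > 1:
--         return True
--     return data in DIGITS
--
-- def _parse_prg_chars(chars):
--     # Build the output back-to-front: scan right-to-left and grow the pending
--     # integer token by prepending onto the youngest output element, so there is
--     # no run buffer, no ''.join and no trailing flush.
--     out = []
--     merged = False  # does out[-1] hold a growing integer token?
--     for char in reversed(list(chars)):
--         if _is_int(char):
--             if merged: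
--                 out[-1] = char + out[-1]
--             else:
--                 out.append(char)
--             merged = True
--         else:
--             out.append(char)
--             merged = False
--     yield from reversed(out)
-- ===== Notes on version B (the rewrite author's own statement) =====
-- stated objective: alternative
-- what changed: B builds the output back-to-front: it scans the tokens right-to-left and grows a pending integer token by string concatenation onto the youngest output element, so A's int_chars run buffer, its ''.join and its trailing flush all disappear.
import Mathlib
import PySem

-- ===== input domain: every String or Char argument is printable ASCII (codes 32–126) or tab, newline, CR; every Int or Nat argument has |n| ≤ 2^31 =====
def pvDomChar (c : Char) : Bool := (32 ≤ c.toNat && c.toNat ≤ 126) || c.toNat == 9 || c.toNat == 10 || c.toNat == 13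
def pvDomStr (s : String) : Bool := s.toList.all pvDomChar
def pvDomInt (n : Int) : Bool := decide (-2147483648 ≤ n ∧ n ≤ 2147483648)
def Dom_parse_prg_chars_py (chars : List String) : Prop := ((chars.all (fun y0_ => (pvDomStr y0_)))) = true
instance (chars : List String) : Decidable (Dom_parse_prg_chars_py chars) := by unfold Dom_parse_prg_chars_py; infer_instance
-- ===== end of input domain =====

-- B builds the output back-to-front (right-to-left scan, merging digit tokens by
-- concatenation onto the youngest output element) instead of A's left-to-right
-- buffer-and-flush loop; an alternative of the same O(n) cost.


-- ===== PORT A =====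
-- DIGITS = {'0',…,'9'}
def pyDIGITS : PySem.Set String :=
  PySem.Set.ofList ["0", "1", "2", "3", "4", "5", "6", "7", "8", "9"]

-- _is_int (the 'data is None' branch cannot fire for a String argument)
def pyIsInt (data : String) : Bool :=
  if data == "" then false
  else if PySem.Str.len data > 1 then true
  else PySem.Set.contains pyDIGITS data

-- A's generator loop: state = int_chars accumulator; flush on non-int char and at the end
def parseLoopA : List String → List String → List String
  | int_chars, [] =>
    if int_chars.isEmpty then [] else [PySem.Str.join "" int_chars]
  | int_chars, c :: rest =>
    if pyIsInt c then parseLoopA (int_chars ++ [c]) rest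
    else (if int_chars.isEmpty then [] else [PySem.Str.join "" int_chars])
           ++ c :: parseLoopA [] rest

def parse_prg_chars_py (chars : List String) : List String := parseLoopA [] chars

-- ===== PORT B =====
-- B's loop body. B keeps its Python list `out` youngest-element-first here (Lean cons =
-- Python append, Lean head = Python out[-1]); since B finally yields reversed(out), the
-- Lean state list IS the final output prefix and no reversal is needed at the end.
-- The ([], true) state is unreachable (merged=True only after an append), so the
-- `out[-1] = char + out[-1]` branch matches on a nonempty list.
def stepB (st : List String × Bool) (c : String) : List String × Bool :=
  if pyIsInt c then
    match st with
    | (h :: t, true) => ((c ++ h) :: t, true)   -- out[-1] = char + out[-1]; merged = True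
    | (out, _) => (c :: out, true)              -- out.append(char); merged = True
  else (c :: st.1, false)                       -- out.append(char); merged = False

-- for char in reversed(list(chars)): … ; yield from reversed(out)
def parse_prg_chars_py_alt (chars : List String) : List String :=
  (chars.reverse.foldl stepB ([], false)).1

-- ===== PRECONDITION & SPEC =====
def Spec_parse_prg_chars_py (chars : List String) (out : List String) : Prop := out = parse_prg_chars_py_alt chars
instance (chars : List String) (out : List String) : Decidable (Spec_parse_prg_chars_py chars out) := by unfold Spec_parse_prg_chars_py; infer_instance

-- ===== CLAIM (what is proved, stated in full; the proofs are below) =====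
def Claim_equal_parse_prg_chars_py : Prop := ∀ (chars : List String), Dom_parse_prg_chars_py chars → Spec_parse_prg_chars_py chars (parse_prg_chars_py chars)

-- ===== LEMMAS AND PROOFS =====

-- B's fold, written as a right fold (foldl over the reverse = foldr)
def foldB (chars : List String) : List String × Bool :=
  chars.foldr (fun c st => stepB st c) ([], false)

theorem alt_eq_foldB (chars : List String) :
    parse_prg_chars_py_alt chars = (foldB chars).1 := by
  unfold parse_prg_chars_py_alt foldB
  rw [List.foldl_reverse]

-- ''.join with an empty separator concatenates
theorem inter_nil (l : List (List Char)) : List.intercalate [] l = l.flatten := by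
  induction l with
  | nil => simp [List.intercalate]
  | cons a l ih =>
    cases l with
    | nil => simp [List.intercalate]
    | cons b l =>
      simp only [List.intercalate, List.intersperse] at *
      simp_all [List.flatten]

theorem join_empty_append (xs : List String) (c : String) :
    PySem.Str.join "" (xs ++ [c]) = PySem.Str.join "" xs ++ c := by
  apply String.ext
  simp [PySem.Str.join, PySem.Chars.join, inter_nil]

theorem join_empty_singleton (c : String) : PySem.Str.join "" [c] = c := by
  apply String.ext
  simp [PySem.Str.join, PySem.Chars.join, inter_nil]

theorem str_append_assoc (a b c : String) : (a ++ b) ++ c = a ++ (b ++ c) := by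
  apply String.ext
  simp

-- the shared invariant: A's loop from an empty accumulator computes B's fold, and from a
-- nonempty accumulator it computes B's fold with the accumulator's join merged in front
theorem loopA_foldB (chars : List String) :
    parseLoopA [] chars = (foldB chars).1 ∧
    ∀ acc, acc ≠ [] → parseLoopA acc chars =
      (match foldB chars with
       | (h :: t, true) => (PySem.Str.join "" acc ++ h) :: t
       | (out, _) => PySem.Str.join "" acc :: out) := by
  induction chars with
  | nil =>
    constructor
    · simp [parseLoopA, foldB]
    · intro acc hacc
      have he : acc.isEmpty = false := by simpa using hacc
      simp [parseLoopA, foldB, he]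
  | cons c rest ih =>
    obtain ⟨ih1, ih2⟩ := ih
    have hstep : foldB (c :: rest) = stepB (foldB rest) c := rfl
    rcases hfb : foldB rest with ⟨out, m⟩
    rw [hfb] at ih1 ih2
    cases hc : pyIsInt c with
    | false =>
      have hfb' : foldB (c :: rest) = (c :: out, false) := by
        rw [hstep, hfb]; simp [stepB, hc]
      constructor
      · simp [parseLoopA, hc, hfb', ih1]
      · intro acc hacc
        have he : acc.isEmpty = false := by simpa using hacc
        simp [parseLoopA, hc, hfb', he, ih1]
    | true =>
      match out, m with
      | h :: t, true =>
        have hfb' : foldB (c :: rest) = ((c ++ h) :: t, true) := by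
          rw [hstep, hfb]; simp [stepB, hc]
        constructor
        · have := ih2 [c] (by simp)
          simp only [parseLoopA, hc, if_true, List.nil_append, hfb']
          simp [this, join_empty_singleton]
        · intro acc hacc
          have := ih2 (acc ++ [c]) (by simp)
          simp only [parseLoopA, hc, if_true, hfb']
          simp [this, join_empty_append, str_append_assoc]
      | [], true =>
        have hfb' : foldB (c :: rest) = ([c], true) := by
          rw [hstep, hfb]; simp [stepB, hc]
        constructor
        · have := ih2 [c] (by simp)
          simp only [parseLoopA, hc, if_true, List.nil_append, hfb']
          simp [this, join_empty_singleton]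
        · intro acc hacc
          have := ih2 (acc ++ [c]) (by simp)
          simp only [parseLoopA, hc, if_true, hfb']
          simp [this, join_empty_append]
      | out, false =>
        have hfb' : foldB (c :: rest) = (c :: out, true) := by
          rw [hstep, hfb]; cases out <;> simp [stepB, hc]
        constructor
        · have := ih2 [c] (by simp)
          simp only [parseLoopA, hc, if_true, List.nil_append, hfb']
          simp [this, join_empty_singleton]
        · intro acc hacc
          have := ih2 (acc ++ [c]) (by simp)
          simp only [parseLoopA, hc, if_true, hfb']
          simp [this, join_empty_append]

-- ===== VERDICT (by name: the statement is the Claim_ definition above) =====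
theorem parse_prg_chars_py_spec : Claim_equal_parse_prg_chars_py := by
  intro chars _
  unfold Spec_parse_prg_chars_py parse_prg_chars_py
  rw [alt_eq_foldB]
  exact (loopA_foldB chars).1
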